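-- pv_equiv track=rewrite | github.com/ericmerle3789/Collatz-Junction-Theorem | scripts/research/r23_continued_fraction.py | P_B_value
-- ===== SOURCE A (Python) =====
-- def P_B_value(B, g, mod=None):
--     """
--     Evaluate P_B(g) = sum_{j=0}^{k-1} g^j * 2^{B_j}.
--     B is a nondecreasing sequence with B[0] = 0.
--     """
--     k = len(B)
--     result = 0
--     g_power = 1
--     for j in range(k):
--         term = g_power * (2**B[j])
--         if mod is not None:
--             term = term % mod
--         result = result + term
--         if mod is not None:
--             result = result % mod
--         g_power = g_power * g
--         if mod is not None:
--             g_power = g_power % mod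
--     return result
-- ===== SOURCE B (Python) =====
-- def P_B_value(B, g, mod=None):
--     """Horner evaluation of P_B(g) = sum_j g^j * 2^(B_j), right-to-left,
--     reducing mod `mod` after every step when mod is not None."""
--     result = 0
--     for b in reversed(B):
--         result = result * g + 2**b
--         if mod is not None:
--             result = result % mod
--     return result
-- ===== Notes on version B (the rewrite author's own statement) =====
-- stated objective: simpler
-- what changed: Replaced the left-to-right loop that maintains a separate running g_power (and reduces term, result and g_power mod m each step) by Horner's rule over reversed(B) with a single accumulator reduced once per step.
-- outside the precondition, e.g. on P_B_value([-1, 58, 58], -1, None): A returns 0.0, B returns 0.5; on P_B_value([1], 2, 0): A raises ZeroDivisionError, B raises ZeroDivisionError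
import Mathlib
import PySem

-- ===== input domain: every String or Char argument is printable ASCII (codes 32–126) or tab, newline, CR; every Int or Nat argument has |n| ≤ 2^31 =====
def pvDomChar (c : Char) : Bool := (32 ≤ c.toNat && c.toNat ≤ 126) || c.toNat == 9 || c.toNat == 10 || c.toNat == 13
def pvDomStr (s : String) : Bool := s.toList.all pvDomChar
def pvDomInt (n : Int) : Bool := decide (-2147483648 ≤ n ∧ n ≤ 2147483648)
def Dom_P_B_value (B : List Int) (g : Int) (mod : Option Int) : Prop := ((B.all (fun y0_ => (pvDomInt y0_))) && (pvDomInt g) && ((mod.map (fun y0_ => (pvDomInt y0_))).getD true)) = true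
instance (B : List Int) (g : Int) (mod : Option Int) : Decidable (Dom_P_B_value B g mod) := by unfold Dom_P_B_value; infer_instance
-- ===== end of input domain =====

-- B replaces A's two-accumulator loop (result + running g_power, each reduced mod m every
-- step) by Horner's rule over the coefficients 2^B[j], a single accumulator: simpler.


-- ===== PORT A =====
-- state = (result, g_power); `2**B[j]` is `2 ^ b.toNat`, exact since Pre_ demands 0 ≤ b
def P_B_value (B : List Int) (g : Int) (mod : Option Int) : Int :=
  (B.foldl (fun (s : Int × Int) b =>
      let term := s.2 * 2 ^ b.toNat
      let term := match mod with | some m => PySem.Int.mod term m | none => term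
      let result := s.1 + term
      let result := match mod with | some m => PySem.Int.mod result m | none => result
      let gp := s.2 * g
      let gp := match mod with | some m => PySem.Int.mod gp m | none => gp
      (result, gp)) (0, 1)).1

-- ===== PORT B =====
-- Horner over reversed(B): result = result*g + 2^b, reduced mod m each step
def P_B_value_alt (B : List Int) (g : Int) (mod : Option Int) : Int :=
  B.foldr (fun b result =>
      let r := result * g + 2 ^ b.toNat
      match mod with | some m => PySem.Int.mod r m | none => r) 0

-- ===== PRECONDITION & SPEC =====
-- Pre_ excludes negative exponents (Python 2**b then yields a float, not an int) and
-- mod = 0 with B nonempty (Python raises ZeroDivisionError).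
def Pre_P_B_value (B : List Int) (g : Int) (mod : Option Int) : Prop :=
  (∀ b ∈ B, 0 ≤ b) ∧ (B ≠ [] → mod ≠ some 0)
instance (B : List Int) (g : Int) (mod : Option Int) : Decidable (Pre_P_B_value B g mod) := by
  unfold Pre_P_B_value; infer_instance
def pvWitness_P_B_value : List Int × Int × Option Int := ([0, 1, 3], -3, some 7)

def Spec_P_B_value (B : List Int) (g : Int) (mod : Option Int) (out : Int) : Prop := out = P_B_value_alt B g mod
instance (B : List Int) (g : Int) (mod : Option Int) (out : Int) : Decidable (Spec_P_B_value B g mod out) := by unfold Spec_P_B_value; infer_instance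

-- ===== CLAIM (what is proved, stated in full; the proofs are below) =====
def Claim_equal_P_B_value : Prop := ∀ (B : List Int) (g : Int) (mod : Option Int), Dom_P_B_value B g mod → Pre_P_B_value B g mod → Spec_P_B_value B g mod (P_B_value B g mod)

-- ===== LEMMAS AND PROOFS =====

-- the exact polynomial value, Horner form (= B's no-mod path)
def pvHorner (g : Int) : List Int → Int
  | [] => 0
  | b :: l => pvHorner g l * g + 2 ^ b.toNat

-- fmod respects congruence
theorem pv_fmod_congr (a b m : Int) (h : m ∣ a - b) : a.fmod m = b.fmod m := by
  obtain ⟨c, hc⟩ := h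
  have : a = b + c * m := by linarith [hc]
  rw [this, Int.add_mul_fmod_self_right]

-- A's no-mod loop computes r + p * pvHorner g l
theorem pvA_none (g : Int) (l : List Int) : ∀ r p : Int,
    (l.foldl (fun (s : Int × Int) b => (s.1 + s.2 * 2 ^ b.toNat, s.2 * g)) (r, p)).1
      = r + p * pvHorner g l := by
  induction l with
  | nil => intro r p; simp [pvHorner]
  | cons b l ih =>
      intro r p
      simp only [List.foldl_cons, pvHorner]
      rw [ih]
      ring

-- A's mod-m loop, started from a reduced result, computes (r + p * pvHorner g l).fmod m
theorem pvA_mod (g m : Int) (l : List Int) : ∀ r p : Int,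
    (l.foldl (fun (s : Int × Int) b =>
        ((s.1 + (s.2 * 2 ^ b.toNat).fmod m).fmod m, (s.2 * g).fmod m)) (r.fmod m, p)).1
      = (r + p * pvHorner g l).fmod m := by
  induction l with
  | nil => intro r p; simp [pvHorner]
  | cons b l ih =>
      intro r p
      simp only [List.foldl_cons]
      have h1 : (r.fmod m + (p * 2 ^ b.toNat).fmod m).fmod m = (r + p * 2 ^ b.toNat).fmod m := by
        rw [← Int.add_fmod]
      rw [h1, ih (r + p * 2 ^ b.toNat) ((p * g).fmod m)]
      apply pv_fmod_congr
      have hd : m ∣ (p * g).fmod m - p * g := by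
        have h2 := Int.fmod_add_mul_fdiv (p * g) m
        exact ⟨-((p * g).fdiv m), by linarith [h2]⟩
      have : r + p * 2 ^ b.toNat + (p * g).fmod m * pvHorner g l
           - (r + p * pvHorner g (b :: l))
           = ((p * g).fmod m - p * g) * pvHorner g l := by
        simp [pvHorner]; ring
      rw [this]
      exact Dvd.dvd.mul_right hd _

-- B's mod-m Horner loop computes (pvHorner g l).fmod m
theorem pvB_mod (g m : Int) (l : List Int) :
    (l.foldr (fun b result => (result * g + 2 ^ b.toNat).fmod m) 0)
      = (pvHorner g l).fmod m := by
  induction l with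
  | nil => simp [pvHorner]
  | cons b l ih =>
      simp only [List.foldr_cons, pvHorner, ih]
      apply pv_fmod_congr
      have hd : m ∣ (pvHorner g l).fmod m - pvHorner g l := by
        have h2 := Int.fmod_add_mul_fdiv (pvHorner g l) m
        exact ⟨-((pvHorner g l).fdiv m), by linarith [h2]⟩
      have : (pvHorner g l).fmod m * g + 2 ^ b.toNat - (pvHorner g l * g + 2 ^ b.toNat)
           = ((pvHorner g l).fmod m - pvHorner g l) * g := by ring
      rw [this]
      exact Dvd.dvd.mul_right hd _

-- B's no-mod Horner loop computes pvHorner g l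
theorem pvB_none (g : Int) (l : List Int) :
    (l.foldr (fun b result => result * g + 2 ^ b.toNat) 0) = pvHorner g l := by
  induction l with
  | nil => simp [pvHorner]
  | cons b l ih => simp [pvHorner, ih]

-- ===== VERDICT (by name: the statement is the Claim_ definition above) =====
theorem P_B_value_spec : Claim_equal_P_B_value := by
  intro B g mod _ _
  unfold Spec_P_B_value P_B_value P_B_value_alt
  cases mod with
  | none =>
      simp only []
      rw [pvA_none g B 0 1, pvB_none]
      ring
  | some m =>
      simp only [PySem.Int.mod]
      rw [pvB_mod g m B]
      have hA := pvA_mod g m B 0 1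
      rw [Int.zero_fmod] at hA
      rw [hA]
      norm_num
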